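-- pv_equiv track=rewrite | github.com/a-sato-ut/Learned_Index_Papers | backend/get_tag.py | apply_hierarchy
-- ===== SOURCE A (Python) =====
-- from typing import Optional, List, Set
--
-- HIERARCHY = {
--     "Learned Bloom Filter": ["Learned Index", "Bloom Filter"],
--     "Bloom Filter": ["Filter"],
--     "Sketch": ["Filter"],
--     "Query optimization": ["Database"],
--     "Cardinality estimation": ["Database"],
--     "Space-Filling Curve": ["Multidimensional"],
--     "Time-series": ["Multidimensional"]
-- }
--
-- def apply_hierarchy(tags: List[str]) -> Set[str]:
--     """包含関係を適用して親タグを追加"""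
--     result_tags = set(tags)
--
--     # 階層的に親タグを追加
--     changed = True
--     while changed:
--         changed = False
--         new_tags = set(result_tags)
--
--         for tag in result_tags:
--             if tag in HIERARCHY:
--                 for parent_tag in HIERARCHY[tag]:
--                     if parent_tag not in new_tags:
--                         new_tags.add(parent_tag)
--                         changed = True
--
--         result_tags = new_tags
--
--     return result_tags
-- ===== SOURCE B (Python) =====
-- from typing import Optional, List, Set
--
-- HIERARCHY = {
--     "Learned Bloom Filter": ["Learned Index", "Bloom Filter"],
--     "Bloom Filter": ["Filter"],
--     "Sketch": ["Filter"],
--     "Query optimization": ["Database"],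
--     "Cardinality estimation": ["Database"],
--     "Space-Filling Curve": ["Multidimensional"],
--     "Time-series": ["Multidimensional"]
-- }
--
-- def apply_hierarchy(tags: List[str]) -> Set[str]:
--     """Add ancestor tags by a single-visit worklist traversal of HIERARCHY."""
--     result = set(tags)
--     queue = list(dict.fromkeys(tags))
--     i = 0
--     while i < len(queue):
--         tag = queue[i]
--         i += 1
--         for parent in HIERARCHY.get(tag, []):
--             if parent not in result:
--                 result.add(parent)
--                 queue.append(parent)
--     return result
-- ===== Notes on version B (the rewrite author's own statement) =====
-- stated objective: idiomatic
-- what changed: Replaces A's repeat-until-fixpoint rescans of the whole tag set with a single-visit worklist (BFS) traversal that follows hierarchy edges, each tag processed once.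
import Mathlib
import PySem

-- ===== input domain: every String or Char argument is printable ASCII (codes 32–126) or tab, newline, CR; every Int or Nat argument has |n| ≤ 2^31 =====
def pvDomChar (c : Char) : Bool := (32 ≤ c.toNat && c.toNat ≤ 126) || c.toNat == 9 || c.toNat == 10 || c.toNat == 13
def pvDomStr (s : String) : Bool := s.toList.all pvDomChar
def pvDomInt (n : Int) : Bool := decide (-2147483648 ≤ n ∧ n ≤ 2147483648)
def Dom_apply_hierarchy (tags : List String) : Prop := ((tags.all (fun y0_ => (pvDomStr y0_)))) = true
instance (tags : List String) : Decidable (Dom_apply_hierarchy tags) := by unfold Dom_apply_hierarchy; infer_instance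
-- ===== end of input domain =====

-- B replaces A's repeated whole-set fixpoint rescans by a single-visit worklist (BFS) traversal
-- of the hierarchy edges (objective: idiomatic; the result is a Python set, ported here in
-- insertion order, which both ports share).

-- ===== PORT A =====

-- the module constant HIERARCHY
def pvHier : PySem.Dict String (List String) := PySem.Dict.ofList
  [("Learned Bloom Filter", ["Learned Index", "Bloom Filter"]),
   ("Bloom Filter", ["Filter"]),
   ("Sketch", ["Filter"]),
   ("Query optimization", ["Database"]),
   ("Cardinality estimation", ["Database"]),
   ("Space-Filling Curve", ["Multidimensional"]),
   ("Time-series", ["Multidimensional"])]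

-- HIERARCHY[t] (resp. HIERARCHY.get(t, []) on the B side)
def pvParents (t : String) : List String := (PySem.Dict.get? pvHier t).getD []

-- every parent value occurring in HIERARCHY (used only for termination measures)
def pvAllParents : List String :=
  ["Learned Index", "Bloom Filter", "Filter", "Database", "Multidimensional"]

-- number of possible parent tags still missing from res (termination measure of both loops)
def pvMiss (res : List String) : Nat :=
  (if "Learned Index" ∈ res then 0 else 1) + (if "Bloom Filter" ∈ res then 0 else 1) +
  (if "Filter" ∈ res then 0 else 1) + (if "Database" ∈ res then 0 else 1) +
  (if "Multidimensional" ∈ res then 0 else 1)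

theorem pvHier_eq : pvHier = PySem.Dict.mk
  [("Learned Bloom Filter", ["Learned Index", "Bloom Filter"]),
   ("Bloom Filter", ["Filter"]),
   ("Sketch", ["Filter"]),
   ("Query optimization", ["Database"]),
   ("Cardinality estimation", ["Database"]),
   ("Space-Filling Curve", ["Multidimensional"]),
   ("Time-series", ["Multidimensional"])] := by decide

theorem pvParents_subset (t : String) (p : String) (hp : p ∈ pvParents t) : p ∈ pvAllParents := by
  rw [pvParents, pvHier_eq] at hp
  simp only [PySem.Dict.get?_mk_cons] at hp
  split_ifs at hp <;> simp_all [pvAllParents, PySem.Dict.get?] <;> tauto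


theorem pvMissInd (x p : String) (res : List String) :
    (if x ∈ res ++ [p] then 0 else 1) = if x = p then (0 : Nat) else if x ∈ res then 0 else 1 := by
  by_cases hxp : x = p
  · subst hxp; simp [List.mem_append]
  · by_cases hxr : x ∈ res <;> simp_all [List.mem_append]

theorem pvMiss_append (p : String) (res : List String) (hp : p ∈ pvAllParents)
    (hnot : p ∉ res) : pvMiss (res ++ [p]) + 1 = pvMiss res := by
  unfold pvAllParents at hp
  simp only [List.mem_cons, List.not_mem_nil, or_false] at hp
  rcases hp with h | h | h | h | h <;> subst h <;>
    simp only [pvMiss, pvMissInd] <;> simp [hnot] <;> split_ifs <;> omega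

-- inner 'for parent_tag in HIERARCHY[tag]' of A, with new_tags and the changed flag
def pvAddParents (ns : List String) (ch : Bool) : List String → List String × Bool
  | [] => (ns, ch)
  | p :: ps => if p ∈ ns then pvAddParents ns ch ps else pvAddParents (ns ++ [p]) true ps

-- the 'for tag in result_tags' scan of one round of A
def pvScanA (ns : List String) (ch : Bool) : List String → List String × Bool
  | [] => (ns, ch)
  | t :: ts =>
    if (PySem.Dict.get? pvHier t).isSome then
      let r := pvAddParents ns ch (pvParents t)
      pvScanA r.1 r.2 ts
    else pvScanA ns ch ts

theorem pvAddParents_miss (ps : List String) (ns : List String) (ch : Bool)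
    (hps : ∀ p ∈ ps, p ∈ pvAllParents) :
    pvMiss (pvAddParents ns ch ps).1 ≤ pvMiss ns ∧
      ((pvAddParents ns ch ps).2 = true → ch = true ∨ pvMiss (pvAddParents ns ch ps).1 < pvMiss ns) := by
  induction ps generalizing ns ch with
  | nil => exact ⟨le_refl _, fun h => Or.inl h⟩
  | cons p ps ih =>
    simp only [pvAddParents]
    by_cases hmem : p ∈ ns
    · simp only [if_pos hmem]
      exact ih ns ch (fun q hq => hps q (List.mem_cons_of_mem _ hq))
    · simp only [if_neg hmem]
      have hdec := pvMiss_append p ns (hps p (List.mem_cons_self)) hmem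
      have h := ih (ns ++ [p]) true (fun q hq => hps q (List.mem_cons_of_mem _ hq))
      exact ⟨by omega, fun _ => Or.inr (by omega)⟩

theorem pvScanA_miss (scan : List String) (ns : List String) (ch : Bool) :
    pvMiss (pvScanA ns ch scan).1 ≤ pvMiss ns ∧
      ((pvScanA ns ch scan).2 = true → ch = true ∨ pvMiss (pvScanA ns ch scan).1 < pvMiss ns) := by
  induction scan generalizing ns ch with
  | nil => exact ⟨le_refl _, fun h => Or.inl h⟩
  | cons t ts ih =>
    simp only [pvScanA]
    by_cases hk : (PySem.Dict.get? pvHier t).isSome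
    · simp only [if_pos hk]
      have ha := pvAddParents_miss (pvParents t) ns ch (fun p hp => pvParents_subset t p hp)
      have h := ih (pvAddParents ns ch (pvParents t)).1 (pvAddParents ns ch (pvParents t)).2
      refine ⟨by omega, fun h2 => ?_⟩
      rcases h.2 h2 with h3 | h3
      · rcases ha.2 h3 with h4 | h4
        · exact Or.inl h4
        · exact Or.inr (by omega)
      · exact Or.inr (by omega)
    · simp only [if_neg hk]; exact ih ns ch

-- the 'while changed' loop of A
def pvLoopA (s : List String) : List String :=
  let r := pvScanA s false s
  if h : r.2 = true then pvLoopA r.1 else r.1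
termination_by pvMiss s
decreasing_by
  have := pvScanA_miss s s false
  rcases this.2 h with h1 | h1
  · exact absurd h1 (by simp)
  · exact h1

def apply_hierarchy (tags : List String) : List String :=
  pvLoopA (PySem.Set.ofList tags)

-- ===== PORT B =====

-- inner 'for parent in HIERARCHY.get(tag, [])' of B: returns (result, acc of newly queued tags)
def pvProcB (res : List String) (acc : List String) : List String → List String × List String
  | [] => (res, acc)
  | p :: ps => if p ∈ res then pvProcB res acc ps else pvProcB (res ++ [p]) (acc ++ [p]) ps

theorem pvProcB_miss (ps : List String) (res acc : List String)
    (hps : ∀ p ∈ ps, p ∈ pvAllParents) :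
    pvMiss (pvProcB res acc ps).1 + (pvProcB res acc ps).2.length = pvMiss res + acc.length := by
  induction ps generalizing res acc with
  | nil => rfl
  | cons p ps ih =>
    simp only [pvProcB]
    by_cases hmem : p ∈ res
    · simp only [if_pos hmem]
      exact ih res acc (fun q hq => hps q (List.mem_cons_of_mem _ hq))
    · simp only [if_neg hmem]
      have hdec := pvMiss_append p res (hps p (List.mem_cons_self)) hmem
      have h := ih (res ++ [p]) (acc ++ [p]) (fun q hq => hps q (List.mem_cons_of_mem _ hq))
      simp only [List.length_append, List.length_singleton] at h ⊢
      omega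

-- the worklist loop of B ('while i < len(queue)': queue[i:] is the remaining worklist q)
def pvLoopB (res : List String) (q : List String) : List String :=
  match q with
  | [] => res
  | t :: q' =>
    let r := pvProcB res [] (pvParents t)
    pvLoopB r.1 (q' ++ r.2)
termination_by q.length + pvMiss res
decreasing_by
  have h := pvProcB_miss (pvParents t) res [] (fun p hp => pvParents_subset t p hp)
  simp only [List.length_nil] at h
  simp only [List.length_append, List.length_cons]
  omega

def apply_hierarchy_alt (tags : List String) : List String :=
  pvLoopB (PySem.Set.ofList tags) (PySem.List.dedup tags)

-- ===== PRECONDITION & SPEC =====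
def Spec_apply_hierarchy (tags : List String) (out : List String) : Prop := out = apply_hierarchy_alt tags
instance (tags : List String) (out : List String) : Decidable (Spec_apply_hierarchy tags out) := by unfold Spec_apply_hierarchy; infer_instance

-- ===== CLAIM (what is proved, stated in full; the proofs are below) =====
def Claim_equal_apply_hierarchy : Prop := ∀ (tags : List String), Dom_apply_hierarchy tags → Spec_apply_hierarchy tags (apply_hierarchy tags)

-- ===== LEMMAS AND PROOFS =====

-- one B-round: process every element of q once, collecting all newly queued tags
def pvScanQ (res : List String) (acc : List String) : List String → List String × List String
  | [] => (res, acc)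
  | t :: ts =>
    let r := pvProcB res [] (pvParents t)
    pvScanQ r.1 (acc ++ r.2) ts

-- a tag all of whose parents are already in res (scanning it adds nothing)
def pvClosed (res : List String) (t : String) : Prop := ∀ p ∈ pvParents t, p ∈ res

theorem pvProcB_shape (ps : List String) (res acc : List String) :
    ∃ new, pvProcB res acc ps = (res ++ new, acc ++ new) := by
  induction ps generalizing res acc with
  | nil => exact ⟨[], by simp [pvProcB]⟩
  | cons p ps ih =>
    simp only [pvProcB]
    by_cases hmem : p ∈ res
    · simp only [if_pos hmem]; exact ih res acc
    · simp only [if_neg hmem]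
      obtain ⟨new, hnew⟩ := ih (res ++ [p]) (acc ++ [p])
      exact ⟨p :: new, by simp [hnew]⟩

theorem pvProcB_acc (ps : List String) (res acc : List String) :
    pvProcB res acc ps = ((pvProcB res [] ps).1, acc ++ (pvProcB res [] ps).2) := by
  induction ps generalizing res acc with
  | nil => simp [pvProcB]
  | cons p ps ih =>
    simp only [pvProcB]
    by_cases hmem : p ∈ res
    · simp only [if_pos hmem]; exact ih res acc
    · simp only [if_neg hmem]
      rw [ih (res ++ [p]) (acc ++ [p]), ih (res ++ [p]) ([] ++ [p])]
      simp

theorem pvAddParents_eq_procB (ps : List String) (ns : List String) (ch : Bool) :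
    pvAddParents ns ch ps = ((pvProcB ns [] ps).1, ch || !(pvProcB ns [] ps).2.isEmpty) := by
  induction ps generalizing ns ch with
  | nil => simp [pvAddParents, pvProcB]
  | cons p ps ih =>
    simp only [pvAddParents, pvProcB]
    by_cases hmem : p ∈ ns
    · simp only [if_pos hmem]; exact ih ns ch
    · simp only [if_neg hmem]
      rw [ih (ns ++ [p]) true, pvProcB_acc ps (ns ++ [p]) ([] ++ [p])]
      simp

theorem pvScanQ_acc (q : List String) (res acc : List String) :
    pvScanQ res acc q = ((pvScanQ res [] q).1, acc ++ (pvScanQ res [] q).2) := by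
  induction q generalizing res acc with
  | nil => simp [pvScanQ]
  | cons t ts ih =>
    simp only [pvScanQ, List.nil_append]
    rw [ih (pvProcB res [] (pvParents t)).1 (acc ++ (pvProcB res [] (pvParents t)).2),
        ih (pvProcB res [] (pvParents t)).1 ((pvProcB res [] (pvParents t)).2)]
    simp

theorem pvScanQ_shape (q : List String) (res : List String) :
    ∃ new, pvScanQ res [] q = (res ++ new, new) := by
  induction q generalizing res with
  | nil => exact ⟨[], by simp [pvScanQ]⟩
  | cons t ts ih =>
    simp only [pvScanQ]
    obtain ⟨n1, hn1⟩ := pvProcB_shape (pvParents t) res []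
    simp only [List.nil_append] at hn1
    obtain ⟨n2, hn2⟩ := ih (res ++ n1)
    rw [pvScanQ_acc]
    rw [hn1]
    simp only [hn2]
    exact ⟨n1 ++ n2, by simp [List.append_assoc]⟩

theorem pvScanA_eq_scanQ (scan : List String) (ns : List String) (ch : Bool) :
    pvScanA ns ch scan = ((pvScanQ ns [] scan).1, ch || !(pvScanQ ns [] scan).2.isEmpty) := by
  induction scan generalizing ns ch with
  | nil => simp [pvScanA, pvScanQ]
  | cons t ts ih =>
    simp only [pvScanA, pvScanQ]
    by_cases hk : (PySem.Dict.get? pvHier t).isSome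
    · simp only [if_pos hk]
      rw [pvAddParents_eq_procB]
      obtain ⟨n1, hn1⟩ := pvProcB_shape (pvParents t) ns []
      simp only [List.nil_append] at hn1
      rw [hn1]
      simp only
      rw [ih (ns ++ n1) (ch || !n1.isEmpty)]
      rw [show pvScanQ (ns ++ n1) ([] ++ n1) ts = pvScanQ (ns ++ n1) n1 ts from by rw [List.nil_append], pvScanQ_acc ts (ns ++ n1) n1]
      obtain ⟨n2, hn2⟩ := pvScanQ_shape ts (ns ++ n1)
      rw [hn2]
      rcases n1 with _ | ⟨a, n1⟩ <;> rcases n2 with _ | ⟨b, n2⟩ <;> simp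
    · simp only [if_neg hk]
      have hpar : pvParents t = [] := by
        unfold pvParents
        rcases Option.not_isSome_iff_eq_none.mp hk with h
        simp [h]
      rw [ih ns ch, pvScanQ_acc ts ns]
      simp [hpar, pvProcB]

theorem pvAddParents_noop (ps : List String) (ns : List String) (ch : Bool)
    (h : ∀ p ∈ ps, p ∈ ns) : pvAddParents ns ch ps = (ns, ch) := by
  induction ps with
  | nil => rfl
  | cons p ps ih =>
    simp only [pvAddParents, if_pos (h p List.mem_cons_self)]
    exact ih (fun q hq => h q (List.mem_cons_of_mem _ hq))

theorem pvScanA_append (l1 l2 : List String) (ns : List String) (ch : Bool) :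
    pvScanA ns ch (l1 ++ l2) = pvScanA (pvScanA ns ch l1).1 (pvScanA ns ch l1).2 l2 := by
  induction l1 generalizing ns ch with
  | nil => rfl
  | cons t ts ih =>
    simp only [List.cons_append, pvScanA]
    by_cases hk : (PySem.Dict.get? pvHier t).isSome
    · simp only [if_pos hk]; exact ih _ _
    · simp only [if_neg hk]; exact ih ns ch

theorem pvScanA_noop (l : List String) (ns : List String) (ch : Bool)
    (h : ∀ t ∈ l, pvClosed ns t) : pvScanA ns ch l = (ns, ch) := by
  induction l with
  | nil => rfl
  | cons t ts ih =>
    simp only [pvScanA]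
    by_cases hk : (PySem.Dict.get? pvHier t).isSome
    · simp only [if_pos hk]
      rw [pvAddParents_noop (pvParents t) ns ch (h t List.mem_cons_self)]
      exact ih (fun u hu => h u (List.mem_cons_of_mem _ hu))
    · simp only [if_neg hk]; exact ih (fun u hu => h u (List.mem_cons_of_mem _ hu))

theorem pvProcB_closes (ps : List String) (res acc : List String) (p : String) (hp : p ∈ ps) :
    p ∈ (pvProcB res acc ps).1 := by
  induction ps generalizing res acc with
  | nil => cases hp
  | cons q qs ih =>
    simp only [pvProcB]
    rcases List.mem_cons.mp hp with h | h
    · subst h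
      by_cases hmem : p ∈ res
      · simp only [if_pos hmem]
        obtain ⟨new, hnew⟩ := pvProcB_shape qs res acc
        rw [hnew]; exact List.mem_append_left _ hmem
      · simp only [if_neg hmem]
        obtain ⟨new, hnew⟩ := pvProcB_shape qs (res ++ [p]) (acc ++ [p])
        rw [hnew]
        exact List.mem_append_left _ (by simp)
    · by_cases hmem : q ∈ res
      · simp only [if_pos hmem]; exact ih res acc h
      · simp only [if_neg hmem]; exact ih _ _ h

theorem pvScanQ_closes (q : List String) (res acc : List String) (t : String) (ht : t ∈ q) :
    pvClosed (pvScanQ res acc q).1 t := by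
  induction q generalizing res acc with
  | nil => cases ht
  | cons u us ih =>
    simp only [pvScanQ]
    rcases List.mem_cons.mp ht with h | h
    · subst h
      intro p hp
      have h1 : p ∈ (pvProcB res [] (pvParents t)).1 := pvProcB_closes _ res [] p hp
      obtain ⟨new, hnew⟩ := pvScanQ_shape us (pvProcB res [] (pvParents t)).1
      rw [pvScanQ_acc, hnew]
      exact List.mem_append_left _ h1
    · exact ih _ _ h

theorem pvScanQ_miss (q : List String) (res : List String) :
    pvMiss (pvScanQ res [] q).1 + (pvScanQ res [] q).2.length = pvMiss res := by
  induction q generalizing res with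
  | nil => rfl
  | cons t ts ih =>
    simp only [pvScanQ, List.nil_append]
    have hp := pvProcB_miss (pvParents t) res [] (fun p hp => pvParents_subset t p hp)
    obtain ⟨n1, hn1⟩ := pvProcB_shape (pvParents t) res []
    simp only [List.nil_append] at hn1
    rw [hn1] at hp
    simp only [List.length_nil] at hp
    rw [hn1]
    dsimp only
    rw [pvScanQ_acc ts (res ++ n1) n1]
    have := ih (res ++ n1)
    simp only [List.length_append]
    omega

theorem pvLoopB_round (q : List String) (res extra : List String) :
    pvLoopB res (q ++ extra) = pvLoopB (pvScanQ res [] q).1 (extra ++ (pvScanQ res [] q).2) := by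
  induction q generalizing res extra with
  | nil => simp [pvScanQ]
  | cons t ts ih =>
    simp only [List.cons_append, pvScanQ]
    rw [pvLoopB]
    have : ts ++ extra ++ (pvProcB res [] (pvParents t)).2
         = ts ++ (extra ++ (pvProcB res [] (pvParents t)).2) := by simp [List.append_assoc]
    rw [this, ih (pvProcB res [] (pvParents t)).1 (extra ++ (pvProcB res [] (pvParents t)).2)]
    rw [show pvScanQ (pvProcB res [] (pvParents t)).1 ([] ++ (pvProcB res [] (pvParents t)).2) ts
          = pvScanQ (pvProcB res [] (pvParents t)).1 (pvProcB res [] (pvParents t)).2 ts from by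
        rw [List.nil_append],
      pvScanQ_acc ts (pvProcB res [] (pvParents t)).1 (pvProcB res [] (pvParents t)).2]
    dsimp only
    rw [List.append_assoc]

theorem pvMain (n : Nat) (res base pend : List String) (hn : pvMiss res ≤ n)
    (hres : res = base ++ pend) (hcl : ∀ t ∈ base, pvClosed res t) :
    pvLoopA res = pvLoopB res pend := by
  induction n generalizing res base pend with
  | zero =>
    rw [pvLoopA]
    have hsplit : pvScanA res false res
        = ((pvScanQ res [] pend).1, false || !(pvScanQ res [] pend).2.isEmpty) := by
      have h1 : pvScanA res false res = pvScanA res false (base ++ pend) := by rw [← hres]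
      rw [h1, pvScanA_append base pend res false, pvScanA_noop base res false hcl]
      exact pvScanA_eq_scanQ pend res false
    obtain ⟨new, hnew⟩ := pvScanQ_shape pend res
    have hm := pvScanQ_miss pend res
    rw [hnew] at hm hsplit
    have hempty : new = [] := by
      cases new with
      | nil => rfl
      | cons a as => simp at hm; omega
    subst hempty
    rw [hsplit]
    simp only [List.append_nil, List.isEmpty_nil, Bool.not_true, Bool.or_false]
    have hB : pvLoopB res pend = res := by
      have := pvLoopB_round pend res []
      simp only [List.append_nil, List.nil_append] at this
      rw [this, hnew]
      simp [pvLoopB]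
    rw [hB]
    simp
  | succ m ih =>
    rw [pvLoopA]
    have hsplit : pvScanA res false res
        = ((pvScanQ res [] pend).1, false || !(pvScanQ res [] pend).2.isEmpty) := by
      have h1 : pvScanA res false res = pvScanA res false (base ++ pend) := by rw [← hres]
      rw [h1, pvScanA_append base pend res false, pvScanA_noop base res false hcl]
      exact pvScanA_eq_scanQ pend res false
    obtain ⟨new, hnew⟩ := pvScanQ_shape pend res
    have hm := pvScanQ_miss pend res
    rw [hnew] at hm hsplit
    have hB : pvLoopB res pend = pvLoopB (res ++ new) new := by
      have := pvLoopB_round pend res []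
      simp only [List.append_nil, List.nil_append] at this
      rw [this, hnew]
    cases hempty : new with
    | nil =>
      subst hempty
      rw [hsplit]
      simp only [List.append_nil, List.isEmpty_nil, Bool.not_true, Bool.or_false]
      rw [hB]
      simp [pvLoopB]
    | cons a as =>
      rw [hsplit]
      simp only [hempty, List.isEmpty_cons, Bool.not_false, Bool.or_true, dif_pos]
      rw [hB, hempty]
      have hmiss : pvMiss (res ++ a :: as) ≤ m := by
        rw [hempty] at hm
        simp only [List.length_cons] at hm
        omega
      have hclosed : ∀ t ∈ res, pvClosed (res ++ a :: as) t := by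
        intro t ht
        rw [hres] at ht
        rcases List.mem_append.mp ht with h | h
        · intro p hp
          have := hcl t h p hp
          rw [hres]
          exact List.mem_append_left _ (hres ▸ this)
        · have := pvScanQ_closes pend res [] t h
          rw [hnew] at this
          rw [hempty] at this
          exact this
      rw [← hempty]
      exact ih (res ++ new) res new (by rw [hempty]; exact hmiss) rfl
        (by rw [hempty]; exact hclosed)

-- ===== VERDICT (by name: the statement is the Claim_ definition above) =====
theorem apply_hierarchy_spec : Claim_equal_apply_hierarchy := by
  intro tags _
  unfold Spec_apply_hierarchy apply_hierarchy apply_hierarchy_alt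
  rw [PySem.List.dedup_eq_ofList]
  exact pvMain (pvMiss (PySem.Set.ofList tags)) (PySem.Set.ofList tags) [] (PySem.Set.ofList tags)
    (le_refl _) rfl (by intro t ht; cases ht)
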